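-- pv_equiv track=rewrite | github.com/FilipGredecki/Horner-s-diagram | zadania/horner.py | find_p_q
-- ===== SOURCE A (Python) =====
-- def find_p_q(coefs):
--     """
--     looks for divisors of the intercept and the coefficient with the highest power
--     """
--     if abs(coefs[-1]) == 0:
--         n = 2
--         while True:
--             if abs(coefs[-n]) != 0:
--                 p = abs(coefs[-n])
--                 p_set = set()
--                 p_set.add(0)
--                 break
--             else:
--                 n += 1
--     else:
--         p = abs(coefs[-1])
--         p_set = set()
--
--     q = abs(coefs[0])
--
--     for i in range(1,p+1):
--         if p % i == 0:
--             p_set.add(i)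
--             p_set.add(-i)
--
--     q_set = set()
--     for i in range(1,q+1):
--         if q % i == 0:
--             q_set.add(i)
--             q_set.add(-i)
--
--     return p_set, q_set
-- ===== SOURCE B (Python) =====
-- def _divisors(n):
--     """sorted list of positive divisors of n (n >= 0) by trial division up to sqrt(n)"""
--     smalls = []
--     larges = []
--     i = 1
--     while i * i <= n:
--         if n % i == 0:
--             smalls.append(i)
--             if i != n // i:
--                 larges.append(n // i)
--         i += 1
--     return smalls + larges[::-1]
--
-- def _signed(n, with_zero):
--     s = {0} if with_zero else set()
--     for d in _divisors(n):
--         s.add(d)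
--         s.add(-d)
--     return s
--
-- def find_p_q(coefs):
--     idx = None
--     for j in range(len(coefs) - 1, -1, -1):
--         if coefs[j] != 0:
--             idx = j
--             break
--     p = abs(coefs[idx])
--     return _signed(p, idx != len(coefs) - 1), _signed(abs(coefs[0]), False)
-- ===== Notes on version B (the rewrite author's own statement) =====
-- stated objective: alternative
-- what changed: Divisor enumeration by trial division only up to sqrt(n), emitting each divisor pair (i, n//i) and merging the small divisors with the reversed large ones, instead of scanning every candidate 1..n; the backward search for the last nonzero coefficient is a single downward index scan instead of repeated negative indexing.
import Mathlib
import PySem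

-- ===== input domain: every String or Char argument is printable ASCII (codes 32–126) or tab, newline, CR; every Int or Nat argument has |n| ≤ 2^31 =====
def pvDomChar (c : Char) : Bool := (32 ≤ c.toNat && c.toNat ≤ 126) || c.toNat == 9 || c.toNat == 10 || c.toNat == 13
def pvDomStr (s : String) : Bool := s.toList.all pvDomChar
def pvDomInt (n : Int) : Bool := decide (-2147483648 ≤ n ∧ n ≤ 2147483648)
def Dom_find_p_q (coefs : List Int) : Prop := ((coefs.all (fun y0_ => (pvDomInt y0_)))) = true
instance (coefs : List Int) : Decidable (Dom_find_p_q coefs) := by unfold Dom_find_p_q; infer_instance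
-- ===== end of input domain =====

-- Alternative algorithm: B enumerates divisors by trial division up to sqrt(n), emitting each
-- divisor pair (i, n//i), instead of scanning every candidate 1..n; the backward search for the
-- last nonzero coefficient becomes a single downward index scan.

-- ===== PORT A =====
-- Python A's backwards `while True` search: n = 2, 3, … until abs(coefs[-n]) != 0
-- (when n exceeds len(coefs), Python raises IndexError — outside Pre_; the port returns (0, []) there).
def pvFindPLoop (coefs : List Int) (n : Nat) : Int × List Int :=
  if h : n ≤ coefs.length then
    if |PySem.List.pyGetD coefs (-(n : Int)) 0| ≠ 0 then
      (|PySem.List.pyGetD coefs (-(n : Int)) 0|, PySem.Set.add PySem.Set.empty 0)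
    else pvFindPLoop coefs (n + 1)
  else (0, [])
termination_by coefs.length + 1 - n

def find_p_q (coefs : List Int) : List Int × List Int :=
  let pp : Int × List Int :=
    if |PySem.List.pyGetD coefs (-1) 0| == 0 then pvFindPLoop coefs 2
    else (|PySem.List.pyGetD coefs (-1) 0|, PySem.Set.empty)
  let p : Int := pp.1
  let p_set0 : List Int := pp.2
  let q : Int := |PySem.List.pyGetD coefs 0 0|
  let p_set : List Int :=
    (PySem.List.pyRange 1 (p + 1) 1).foldl
      (fun s i => if PySem.Int.mod p i == 0 then PySem.Set.add (PySem.Set.add s i) (-i) else s)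
      p_set0
  let q_set : List Int :=
    (PySem.List.pyRange 1 (q + 1) 1).foldl
      (fun s i => if PySem.Int.mod q i == 0 then PySem.Set.add (PySem.Set.add s i) (-i) else s)
      PySem.Set.empty
  (p_set, q_set)

-- ===== PORT B =====
-- termination helper for the sqrt loop
theorem pvSq_lt {n i : Nat} (h : i * i ≤ n) : n + 1 - (i + 1) * (i + 1) < n + 1 - i * i := by
  have : (i + 1) * (i + 1) = i * i + 2 * i + 1 := by ring
  omega

-- Source B `_divisors` while-loop: i = 1, 2, … while i*i <= n, appending i to smalls and n//i to larges
def pvDivLoop (n i : Nat) (smalls larges : List Nat) : List Nat × List Nat :=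
  if h : i * i ≤ n then
    if n % i == 0 then
      pvDivLoop n (i + 1) (smalls ++ [i]) (if i ≠ n / i then larges ++ [n / i] else larges)
    else pvDivLoop n (i + 1) smalls larges
  else (smalls, larges)
termination_by n + 1 - i * i
decreasing_by all_goals exact pvSq_lt h

def pvDivisors (n : Nat) : List Nat :=
  let sl := pvDivLoop n 1 [] []
  sl.1 ++ sl.2.reverse

-- Source B `_signed`
def pvSigned (n : Nat) (withZero : Bool) : List Int :=
  (pvDivisors n).foldl
    (fun (s : List Int) (d : Nat) => PySem.Set.add (PySem.Set.add s (d : Int)) (-(d : Int)))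
    (if withZero then PySem.Set.add PySem.Set.empty 0 else PySem.Set.empty)

-- Source B for-loop with break: scan j = j0, j0-1, …, 0 for the first nonzero coefficient
def pvScanNZ (coefs : List Int) (j : Nat) : Option Nat :=
  if coefs.getD j 0 ≠ 0 then some j
  else match j with
    | 0 => none
    | j' + 1 => pvScanNZ coefs j'

def find_p_q_alt (coefs : List Int) : List Int × List Int :=
  match pvScanNZ coefs (coefs.length - 1) with
  | none => ([], [])  -- Source B raises TypeError here (idx is None) — outside Pre_
  | some idx =>
      (pvSigned (coefs.getD idx 0).natAbs (decide (idx ≠ coefs.length - 1)),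
       pvSigned (PySem.List.pyGetD coefs 0 0).natAbs false)

-- ===== PRECONDITION & SPEC =====
-- Pre_ excludes exactly the inputs on which Python A raises IndexError: the empty list and
-- all-zero lists (A's backwards search runs off the front of the list).
def Pre_find_p_q (coefs : List Int) : Prop := ∃ x ∈ coefs, x ≠ 0
instance (coefs : List Int) : Decidable (Pre_find_p_q coefs) := by unfold Pre_find_p_q; infer_instance

def pvWitness_find_p_q : List Int := [1, 0, -6]

def Spec_find_p_q (coefs : List Int) (out : List Int × List Int) : Prop := out = find_p_q_alt coefs
instance (coefs : List Int) (out : List Int × List Int) : Decidable (Spec_find_p_q coefs out) := by unfold Spec_find_p_q; infer_instance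

-- ===== CLAIM (what is proved, stated in full; the proofs are below) =====
def Claim_equal_find_p_q : Prop := ∀ (coefs : List Int), Dom_find_p_q coefs → Pre_find_p_q coefs → Spec_find_p_q coefs (find_p_q coefs)

-- ===== LEMMAS AND PROOFS =====

-- ---- the scan (B) and the backwards while loop (A) find the same coefficient ----

theorem pvScanNZ_some {coefs : List Int} : ∀ {j i : Nat}, pvScanNZ coefs j = some i →
    coefs.getD i 0 ≠ 0 ∧ i ≤ j := by
  intro j
  induction j with
  | zero =>
    intro i h
    rw [pvScanNZ] at h
    split_ifs at h with hz
    · cases h; exact ⟨hz, le_refl _⟩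
  | succ j' ih =>
    intro i h
    rw [pvScanNZ] at h
    split_ifs at h with hz
    · cases h; exact ⟨hz, le_refl _⟩
    · obtain ⟨h1, h2⟩ := ih h
      exact ⟨h1, h2.trans (Nat.le_succ _)⟩

theorem pvScanNZ_isSome {coefs : List Int} : ∀ {j k : Nat}, k ≤ j →
    coefs.getD k 0 ≠ 0 → (pvScanNZ coefs j).isSome := by
  intro j
  induction j with
  | zero =>
    intro k hk hnz
    interval_cases k
    rw [pvScanNZ, if_pos hnz]; rfl
  | succ j' ih =>
    intro k hk hnz
    rw [pvScanNZ]
    split_ifs with hz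
    · rfl
    · have hk' : k ≤ j' := by
        rcases Nat.lt_or_ge k (j' + 1) with h | h
        · omega
        · exfalso; have : k = j' + 1 := by omega
          subst this; exact hnz (not_not.mp hz)
      exact ih hk' hnz

theorem pvFindPLoop_eq_scan (coefs : List Int) :
    ∀ d n, coefs.length - n = d → 1 ≤ n → n ≤ coefs.length →
    ∀ i, pvScanNZ coefs (coefs.length - n) = some i →
    pvFindPLoop coefs n = (|coefs.getD i 0|, [0]) := by
  intro d
  induction d with
  | zero =>
    intro n hd h1 hlen i hscan
    rw [hd, pvScanNZ] at hscan
    split_ifs at hscan with hz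
    · cases hscan
      have hpg : PySem.List.pyGetD coefs (-(n : Int)) 0 = coefs.getD (coefs.length - n) 0 := by
        rw [PySem.List.pyGetD_neg_natCast coefs n 0 h1 hlen,
          List.getD_eq_getElem _ _ (by omega)]
      rw [pvFindPLoop, dif_pos hlen, hpg, hd, if_pos (abs_ne_zero.mpr hz)]
      rfl
  | succ d' ih =>
    intro n hd h1 hlen i hscan
    rw [hd, pvScanNZ] at hscan
    have hpg : PySem.List.pyGetD coefs (-(n : Int)) 0 = coefs.getD (coefs.length - n) 0 := by
      rw [PySem.List.pyGetD_neg_natCast coefs n 0 h1 hlen,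
        List.getD_eq_getElem _ _ (by omega)]
    split_ifs at hscan with hz
    · cases hscan
      rw [pvFindPLoop, dif_pos hlen, hpg, hd, if_pos (abs_ne_zero.mpr hz)]
      rfl
    · rw [pvFindPLoop, dif_pos hlen, hpg, hd,
        if_neg (by simpa using not_not.mp hz)]
      apply ih (n + 1) (by omega) (by omega) (by omega) i
      have h2 : coefs.length - (n + 1) = d' := by omega
      rw [h2]
      exact hscan

-- ---- the sqrt divisor loop produces exactly the sorted divisor list ----

theorem pvDivLoop_spec (n : Nat) : ∀ k i smalls larges, Nat.sqrt n + 1 - i = k → 1 ≤ i →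
    pvDivLoop n i smalls larges =
      (smalls ++ (List.range' i k).filter (fun d => n % d == 0),
       larges ++ (((List.range' i k).filter (fun d => n % d == 0)).filter
                    (fun d => d ≠ n / d)).map (n / ·)) := by
  intro k
  induction k with
  | zero =>
    intro i s l hk h1
    have hgt : ¬ i * i ≤ n := by
      intro hle
      have := Nat.le_sqrt.mpr hle
      omega
    rw [pvDivLoop, dif_neg hgt]
    simp
  | succ k' ih =>
    intro i s l hk h1
    have hle : i * i ≤ n := Nat.le_sqrt.mp (by omega)
    rw [pvDivLoop, dif_pos hle, List.range'_succ]
    by_cases hdvd : n % i = 0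
    · rw [if_pos (by simpa using hdvd)]
      rw [ih (i + 1) _ _ (by omega) (by omega)]
      rw [List.filter_cons_of_pos (by simpa using hdvd)]
      by_cases hsq : i ≠ n / i
      · rw [if_pos hsq, List.filter_cons_of_pos (by simpa using hsq)]
        simp
      · rw [if_neg hsq, List.filter_cons_of_neg (by simpa using hsq)]
        simp
    · rw [if_neg (by simpa using hdvd)]
      rw [ih (i + 1) _ _ (by omega) (by omega)]
      rw [List.filter_cons_of_neg (by simpa using hdvd)]

theorem pvDivisors_eq (n : Nat) :
    pvDivisors n = (List.range' 1 n).filter (fun d => n % d == 0) := by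
  have hspec := pvDivLoop_spec n (Nat.sqrt n) 1 [] [] (by omega) (le_refl 1)
  set S : List Nat := (List.range' 1 (Nat.sqrt n)).filter (fun d => n % d == 0) with hS
  set L : List Nat := (S.filter (fun d => d ≠ n / d)).map (n / ·) with hL
  have hdiv : pvDivisors n = S ++ L.reverse := by
    rw [pvDivisors, hspec]; simp
  have hmemS : ∀ x, x ∈ S ↔ (1 ≤ x ∧ x * x ≤ n ∧ n % x = 0) := by
    intro x
    rw [hS]
    simp only [List.mem_filter, List.mem_range'_1, beq_iff_eq]
    constructor
    · rintro ⟨⟨h1, h2⟩, h3⟩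
      exact ⟨h1, Nat.le_sqrt.mp (by omega), h3⟩
    · rintro ⟨h1, h2, h3⟩
      exact ⟨⟨h1, by have := Nat.le_sqrt.mpr h2; omega⟩, h3⟩
  have hmemL : ∀ y, y ∈ L ↔ ∃ d, d ∈ S ∧ d ≠ n / d ∧ n / d = y := by
    intro y
    rw [hL]
    simp only [List.mem_map, List.mem_filter, decide_eq_true_eq]
    constructor
    · rintro ⟨d, ⟨hd1, hd2⟩, hd3⟩
      exact ⟨d, hd1, hd2, hd3⟩
    · rintro ⟨d, hd1, hd2, hd3⟩
      exact ⟨d, ⟨hd1, hd2⟩, hd3⟩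
  have hfactL : ∀ y ∈ L, y ∣ n ∧ n < y * y ∧ 1 ≤ y ∧ y ≤ n := by
    intro y hy
    obtain ⟨d, hdS, hdne, hdy⟩ := (hmemL y).mp hy
    obtain ⟨hd1, hdsq, hdmod⟩ := (hmemS d).mp hdS
    have hdvd : d ∣ n := Nat.dvd_of_mod_eq_zero hdmod
    have hmul : n / d * d = n := Nat.div_mul_cancel hdvd
    subst hdy
    have hn1 : 1 ≤ n := by nlinarith
    have hy1 : 1 ≤ n / d := Nat.div_pos (Nat.le_of_dvd hn1 hdvd) (by omega)
    have hdlt : d < n / d := by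
      rcases Nat.lt_or_ge d (n / d) with h | h
      · exact h
      · exfalso
        have : n / d * d ≤ d * d := by nlinarith
        have : d = n / d := by nlinarith
        exact hdne this
    refine ⟨⟨d, hmul.symm.trans (by ring)⟩, by nlinarith, hy1, Nat.div_le_self n d⟩
  have hmemEq : ∀ x, x ∈ S ++ L.reverse ↔ x ∈ (List.range' 1 n).filter (fun d => n % d == 0) := by
    intro x
    simp only [List.mem_append, List.mem_reverse, List.mem_filter, List.mem_range'_1, beq_iff_eq]
    constructor
    · rintro (hx | hx)
      · obtain ⟨h1, h2, h3⟩ := (hmemS x).mp hx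
        exact ⟨⟨h1, by nlinarith⟩, h3⟩
      · obtain ⟨hdvd, hlt, h1, h2⟩ := hfactL x hx
        exact ⟨⟨h1, by omega⟩, Nat.mod_eq_zero_of_dvd hdvd⟩
    · rintro ⟨⟨h1, h2⟩, h3⟩
      have hxn : x ≤ n := by omega
      have hdvd : x ∣ n := Nat.dvd_of_mod_eq_zero h3
      have hn1 : 1 ≤ n := by omega
      by_cases hsq : x * x ≤ n
      · exact Or.inl ((hmemS x).mpr ⟨h1, hsq, h3⟩)
      · right
        rw [hmemL]
        have hxx : n < x * x := by omega
        set d : Nat := n / x with hd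
        have hmul : d * x = n := Nat.div_mul_cancel hdvd
        have hd1 : 1 ≤ d := Nat.div_pos hxn (by omega)
        have hdx : d < x := by nlinarith
        have hddn : d * d ≤ n := by nlinarith
        have hnx : n / d = x := by rw [hd]; exact Nat.div_div_self hdvd (by omega)
        refine ⟨d, (hmemS d).mpr ⟨hd1, hddn, Nat.mod_eq_zero_of_dvd (Nat.div_dvd_of_dvd hdvd)⟩, ?_, hnx⟩
        rw [hnx]; omega
  have hpairS : S.Pairwise (· < ·) := List.Pairwise.filter _ (List.pairwise_lt_range' ..)
  have hdivlt : ∀ a b : Nat, a ∈ S → b ∈ S → a < b → n / b < n / a := by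
    intro a b haS hbS hab
    obtain ⟨ha1, hasq, hamod⟩ := (hmemS a).mp haS
    obtain ⟨hb1, hbsq, hbmod⟩ := (hmemS b).mp hbS
    have hn1 : 1 ≤ n := by nlinarith
    have hma : n / a * a = n := Nat.div_mul_cancel (Nat.dvd_of_mod_eq_zero hamod)
    have hmb : n / b * b = n := Nat.div_mul_cancel (Nat.dvd_of_mod_eq_zero hbmod)
    have hbpos : 1 ≤ n / b := Nat.div_pos (by nlinarith) (by omega)
    rcases Nat.lt_or_ge (n / b) (n / a) with h | h
    · exact h
    · exfalso; nlinarith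
  have hpairL : L.reverse.Pairwise (· < ·) := by
    rw [List.pairwise_reverse, hL, List.pairwise_map]
    refine List.Pairwise.imp_of_mem ?_ (List.Pairwise.filter _ hpairS)
    intro a b ha hb hab
    exact hdivlt a b (List.mem_of_mem_filter ha) (List.mem_of_mem_filter hb) hab
  have hcross : ∀ a ∈ S, ∀ b ∈ L.reverse, a < b := by
    intro a haS b hbL
    rw [List.mem_reverse] at hbL
    obtain ⟨_, hlt, _, _⟩ := hfactL b hbL
    obtain ⟨_, hasq, _⟩ := (hmemS a).mp haS
    nlinarith
  have hpairLHS : (S ++ L.reverse).Pairwise (· < ·) :=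
    List.pairwise_append.mpr ⟨hpairS, hpairL, hcross⟩
  have hpairRHS : ((List.range' 1 n).filter (fun d => n % d == 0)).Pairwise (· < ·) :=
    List.Pairwise.filter _ (List.pairwise_lt_range' ..)
  rw [hdiv]
  exact List.Perm.eq_of_pairwise (fun a b _ _ h1 h2 => by omega) hpairLHS hpairRHS
    ((List.perm_ext_iff_of_nodup (hpairLHS.imp fun h => Nat.ne_of_lt h)
      (hpairRHS.imp fun h => Nat.ne_of_lt h)).mpr hmemEq)

-- ---- both signed folds reduce to a fold over the divisor list ----

theorem pvSignedA_eq (m : Int) (hm : 0 ≤ m) (s0 : List Int) :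
    (PySem.List.pyRange 1 (m + 1) 1).foldl
      (fun s i => if PySem.Int.mod m i == 0 then PySem.Set.add (PySem.Set.add s i) (-i) else s) s0
    = ((List.range' 1 m.toNat).filter (fun d => m.toNat % d == 0)).foldl
        (fun (s : List Int) (d : Nat) => PySem.Set.add (PySem.Set.add s (d : Int)) (-(d : Int))) s0 := by
  obtain ⟨M, rfl⟩ : ∃ M : Nat, m = (M : Int) := ⟨m.toNat, (Int.toNat_of_nonneg hm).symm⟩
  simp only [Int.toNat_natCast]
  rw [PySem.List.pyRange_one]
  have h1 : (((M : Int) + 1 - 1)).toNat = M := by omega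
  rw [h1, List.foldl_map, List.foldl_filter, List.range'_eq_map_range, List.foldl_map]
  congr 1
  funext s k
  have he : ((1 + k : Nat) : Int) = 1 + (k : Int) := by push_cast; ring
  have hc : PySem.Int.mod (M : Int) (1 + (k : Int)) = ((M % (1 + k) : Nat) : Int) := by
    rw [← he, PySem.Int.mod_natCast]
  rw [hc]
  have hb : ((((M % (1 + k) : Nat) : Int)) == (0 : Int)) = ((M % (1 + k)) == (0 : Nat)) := by
    rw [Bool.eq_iff_iff]
    simp only [beq_iff_eq, Nat.cast_eq_zero]
  rw [hb, ← he]

-- the fold A runs over range(1, |c|+1) equals B's pvSigned, for matching initial sets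
theorem pvFold_eq_signed (c : Int) (s0 : List Int) (w : Bool)
    (hs0 : s0 = (if w then PySem.Set.add PySem.Set.empty 0 else PySem.Set.empty)) :
    (PySem.List.pyRange 1 (|c| + 1) 1).foldl
      (fun s i => if PySem.Int.mod |c| i == 0 then PySem.Set.add (PySem.Set.add s i) (-i) else s) s0
    = pvSigned c.natAbs w := by
  have habs : |c| = ((c.natAbs : Nat) : Int) := by
    rw [Int.abs_eq_natAbs]
  rw [habs, pvSignedA_eq _ (by positivity) s0]
  simp only [Int.toNat_natCast]
  rw [pvSigned, pvDivisors_eq, hs0]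

-- ===== VERDICT (by name: the statement is the Claim_ definition above) =====
theorem find_p_q_spec : Claim_equal_find_p_q := by
  intro coefs _hdom hpre
  unfold Spec_find_p_q
  obtain ⟨x, hxmem, hxne⟩ := hpre
  have hlen : 0 < coefs.length := List.length_pos_of_mem hxmem
  obtain ⟨k, hk, hkx⟩ := List.getElem_of_mem hxmem
  have hkD : coefs.getD k 0 ≠ 0 := by
    rw [List.getD_eq_getElem _ _ hk, hkx]; exact hxne
  have hsome := pvScanNZ_isSome (j := coefs.length - 1) (by omega : k ≤ coefs.length - 1) hkD
  obtain ⟨idx, hidx⟩ := Option.isSome_iff_exists.mp hsome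
  obtain ⟨hidxnz, hidxle⟩ := pvScanNZ_some hidx
  have hpg1 : PySem.List.pyGetD coefs (-1) 0 = coefs.getD (coefs.length - 1) 0 := by
    have h := PySem.List.pyGetD_neg_natCast coefs 1 0 (by omega) (by omega)
    rw [List.getD_eq_getElem _ _ (by omega)]
    simpa using h
  simp only [find_p_q, find_p_q_alt, hidx]
  rw [hpg1]
  by_cases hlast : coefs.getD (coefs.length - 1) 0 = 0
  · -- trailing zero: A enters the backwards while loop, B records the zero root
    rw [if_pos (by simpa [List.getD] using hlast)]
    have hlen2 : 2 ≤ coefs.length := by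
      by_contra h
      have hk0 : k = 0 := by omega
      have h0 : coefs.length - 1 = 0 := by omega
      rw [h0] at hlast
      rw [hk0] at hkD
      exact hkD hlast
    have hl1 : coefs.length - 1 = (coefs.length - 2) + 1 := by omega
    rw [hl1] at hidx hlast
    rw [pvScanNZ] at hidx
    split_ifs at hidx with hz
    · exact absurd hlast hz
    obtain ⟨_, hidxle2⟩ := pvScanNZ_some hidx
    have hloop := pvFindPLoop_eq_scan coefs (coefs.length - 2) 2 rfl (by omega) (by omega) idx hidx
    rw [hloop]
    dsimp only
    have hne : (decide (idx ≠ coefs.length - 1)) = true := by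
      have : idx ≠ coefs.length - 1 := by omega
      simp [this]
    rw [hne]
    simp only [Prod.mk.injEq]
    exact ⟨pvFold_eq_signed _ _ true rfl, pvFold_eq_signed _ _ false rfl⟩
  · -- trailing coefficient nonzero: both take it directly
    rw [if_neg (by simpa [List.getD] using hlast)]
    rw [pvScanNZ.eq_def] at hidx
    split_ifs at hidx with hz
    · cases hidx
      have hd : (decide (coefs.length - 1 ≠ coefs.length - 1)) = false := by simp
      rw [hd]
      dsimp only
      simp only [Prod.mk.injEq]
      exact ⟨pvFold_eq_signed _ _ false rfl, pvFold_eq_signed _ _ false rfl⟩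
    · exact absurd (not_not.mp hz) hlast
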